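-- pv_equiv track=rewrite | github.com/xenozuron7/autoqa-dashboard | app.py | count_by_client_and_status
-- ===== SOURCE A (Python) =====
-- from typing import Dict, List, Optional, Callable, Any
--
-- def parse_ticket_status(ticket: dict) -> str:
--     """Determine ticket status from auto_qa_status"""
--     auto_qa_status = str(ticket.get('auto_qa_status', '')).lower()
--     request_status = str(ticket.get('request_status', '')).lower()
--
--     if auto_qa_status == 'complete':
--         return 'completed'
--     elif auto_qa_status == 'callback':
--         return 'callback'
--     elif auto_qa_status == 'failed' or request_status == 'failed':
--         return 'failed'
--     return 'processing'
--
-- def init_stats_dict() -> dict: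
--     """Initialize empty stats dictionary"""
--     return {'completed': 0, 'processing': 0, 'failed': 0, 'callback': 0}
--
-- def count_by_client_and_status(data: List[dict]) -> Dict[str, Dict[str, int]]:
--     """
--     Count items by client and status in memory
--     Returns: {client_id: {status: count}}
--     """
--     client_counts = {}
--
--     for item in data:
--         client_id = str(item.get('client_id', 'unknown'))
--         status = parse_ticket_status(item)
--
--         if client_id not in client_counts:
--             client_counts[client_id] = init_stats_dict()
--
--         client_counts[client_id][status] += 1
--
--     return client_counts
-- ===== SOURCE B (Python) =====
-- def parse_ticket_status(ticket: dict) -> str: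
--     """Determine ticket status from auto_qa_status"""
--     auto_qa_status = str(ticket.get('auto_qa_status', '')).lower()
--     request_status = str(ticket.get('request_status', '')).lower()
--
--     if auto_qa_status == 'complete':
--         return 'completed'
--     elif auto_qa_status == 'callback':
--         return 'callback'
--     elif auto_qa_status == 'failed' or request_status == 'failed':
--         return 'failed'
--     return 'processing'
--
--
-- def count_by_client_and_status(data):
--     """Group tickets per client first, then count statuses per group."""
--     groups = {}
--     for item in data:
--         groups.setdefault(str(item.get('client_id', 'unknown')), []).append(item)
--
--     result = {}
--     for client_id, items in groups.items():
--         counts = {'completed': 0, 'processing': 0, 'failed': 0, 'callback': 0}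
--         for it in items:
--             counts[parse_ticket_status(it)] += 1
--         result[client_id] = counts
--     return result
-- ===== Notes on version B (the rewrite author's own statement) =====
-- stated objective: alternative
-- what changed: B first builds a client_id -> list-of-tickets grouping dict in one pass, then counts statuses per group from a fresh zeroed stats dict, instead of A's single pass that lazily initializes and increments nested per-client dicts.
import Mathlib
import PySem

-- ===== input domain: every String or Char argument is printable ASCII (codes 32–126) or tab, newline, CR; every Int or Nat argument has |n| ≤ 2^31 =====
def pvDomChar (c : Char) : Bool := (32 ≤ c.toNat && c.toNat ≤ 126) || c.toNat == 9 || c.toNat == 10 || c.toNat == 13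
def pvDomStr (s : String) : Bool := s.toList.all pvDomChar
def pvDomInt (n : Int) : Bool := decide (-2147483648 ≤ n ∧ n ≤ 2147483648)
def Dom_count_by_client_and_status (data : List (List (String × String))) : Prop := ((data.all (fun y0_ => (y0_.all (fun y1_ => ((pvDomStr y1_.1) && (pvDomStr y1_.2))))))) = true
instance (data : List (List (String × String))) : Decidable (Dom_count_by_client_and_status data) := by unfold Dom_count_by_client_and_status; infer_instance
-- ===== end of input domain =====

-- B groups tickets by client first and then counts each group from a fresh zeroed
-- stats dict, instead of A's single pass with lazily-initialized nested counters
-- (objective: alternative decomposition, same cost).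

-- ===== PORT A =====
-- shared module helper; str() on the already-string values is the identity
def parse_ticket_status (ticket : List (String × String)) : String :=
  let auto_qa_status := PySem.Str.lower ((PySem.Dict.mk ticket).getD "auto_qa_status" "")
  let request_status := PySem.Str.lower ((PySem.Dict.mk ticket).getD "request_status" "")
  if auto_qa_status = "complete" then "completed"
  else if auto_qa_status = "callback" then "callback"
  else if auto_qa_status = "failed" || request_status = "failed" then "failed"
  else "processing"

def init_stats_dict : PySem.Dict String Int :=
  PySem.Dict.ofList [("completed", 0), ("processing", 0), ("failed", 0), ("callback", 0)]

-- 'client_counts[client_id][status] += 1' is modify-at-status; its default 0 is never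
-- consulted because every inner dict descends from init_stats_dict, which carries all
-- four statuses parse_ticket_status can return — exact, no KeyError is reachable.
def count_by_client_and_status (data : List (List (String × String))) : List (String × List (String × Int)) :=
  let client_counts : PySem.Dict String (PySem.Dict String Int) :=
    data.foldl (fun client_counts item =>
      let client_id := (PySem.Dict.mk item).getD "client_id" "unknown"
      let status := parse_ticket_status item
      let client_counts :=
        if client_counts.contains client_id then client_counts
        else client_counts.insert client_id init_stats_dict
      client_counts.modify client_id init_stats_dict (fun d => d.modify status 0 (· + 1)))
      PySem.Dict.empty
  client_counts.items.map (fun p => (p.1, p.2.items))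

-- ===== PORT B =====
-- 'groups.setdefault(cid, []).append(item)' = modify at cid with default []
def pv_count_statuses (items : List (List (String × String))) : PySem.Dict String Int :=
  items.foldl (fun counts it => counts.modify (parse_ticket_status it) 0 (· + 1)) init_stats_dict

def count_by_client_and_status_alt (data : List (List (String × String))) : List (String × List (String × Int)) :=
  let groups : PySem.Dict String (List (List (String × String))) :=
    data.foldl (fun groups item =>
      groups.modify ((PySem.Dict.mk item).getD "client_id" "unknown") [] (· ++ [item]))
      PySem.Dict.empty
  groups.items.map (fun p => (p.1, (pv_count_statuses p.2).items))

-- ===== PRECONDITION & SPEC =====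
def Spec_count_by_client_and_status (data : List (List (String × String))) (out : List (String × List (String × Int))) : Prop := out = count_by_client_and_status_alt data
instance (data : List (List (String × String))) (out : List (String × List (String × Int))) : Decidable (Spec_count_by_client_and_status data out) := by unfold Spec_count_by_client_and_status; infer_instance

-- ===== CLAIM (what is proved, stated in full; the proofs are below) =====
def Claim_equal_count_by_client_and_status : Prop := ∀ (data : List (List (String × String))), Dom_count_by_client_and_status data → Spec_count_by_client_and_status data (count_by_client_and_status data)

-- ===== LEMMAS AND PROOFS =====

def pvCid (item : List (String × String)) : String :=
  (PySem.Dict.mk item).getD "client_id" "unknown"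

def pvStepA (cc : PySem.Dict String (PySem.Dict String Int)) (item : List (String × String)) :
    PySem.Dict String (PySem.Dict String Int) :=
  let client_id := pvCid item
  let cc' := if cc.contains client_id then cc else cc.insert client_id init_stats_dict
  cc'.modify client_id init_stats_dict (fun d => d.modify (parse_ticket_status item) 0 (· + 1))

def pvStepB (g : PySem.Dict String (List (List (String × String)))) (item : List (String × String)) :
    PySem.Dict String (List (List (String × String))) :=
  g.modify (pvCid item) [] (· ++ [item])


lemma pvStepA_getD (cc : PySem.Dict String (PySem.Dict String Int))
    (item : List (String × String)) (c : String) :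
    (pvStepA cc item).getD c init_stats_dict =
      if pvCid item == c then
        (cc.getD c init_stats_dict).modify (parse_ticket_status item) 0 (· + 1)
      else cc.getD c init_stats_dict := by
  unfold pvStepA
  rw [PySem.Dict.getD_modify]
  by_cases hc : c = pvCid item
  · have hb : (pvCid item == c) = true := by simp [hc]
    rw [if_pos hc, hb, if_pos rfl]
    by_cases h : cc.contains (pvCid item)
    · rw [if_pos h, hc]
    · simp only [Bool.not_eq_true] at h
      rw [if_neg (by simp [h]), PySem.Dict.getD_insert, if_pos rfl, hc,
          PySem.Dict.getD_of_not_contains cc init_stats_dict h]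
  · have hb : (pvCid item == c) = false := by simp [Ne.symm hc]
    rw [if_neg hc, hb]
    simp only [Bool.false_eq_true, if_false]
    by_cases h : cc.contains (pvCid item)
    · rw [if_pos h]
    · simp only [Bool.not_eq_true] at h
      rw [if_neg (by simp [h]), PySem.Dict.getD_insert, if_neg hc]

lemma pvA_getD (data : List (List (String × String)))
    (cc : PySem.Dict String (PySem.Dict String Int)) (c : String) :
    (data.foldl pvStepA cc).getD c init_stats_dict =
      (data.filter (fun it => pvCid it == c)).foldl
        (fun d it => d.modify (parse_ticket_status it) 0 (· + 1)) (cc.getD c init_stats_dict) := by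
  induction data generalizing cc with
  | nil => rfl
  | cons item rest ih =>
    simp only [List.foldl_cons, List.filter_cons, ih, pvStepA_getD]
    by_cases h : pvCid item == c
    · simp [h]
    · simp only [Bool.not_eq_true] at h
      simp [h]

lemma pvB_getD (data : List (List (String × String)))
    (g : PySem.Dict String (List (List (String × String)))) (c : String) :
    (data.foldl pvStepB g).getD c [] =
      g.getD c [] ++ data.filter (fun it => pvCid it == c) := by
  induction data generalizing g with
  | nil => simp
  | cons item rest ih =>
    simp only [List.foldl_cons, List.filter_cons, ih, pvStepB, PySem.Dict.getD_modify]
    by_cases h : pvCid item == c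
    · have hc : c = pvCid item := by
        have := of_decide_eq_true (by simpa using h)
        exact this.symm
      simp [hc]
    · simp only [Bool.not_eq_true] at h
      have hc : ¬ c = pvCid item := by
        intro e; subst e; simp at h
      simp [h, hc]

lemma pvStepA_keys (cc : PySem.Dict String (PySem.Dict String Int))
    (item : List (String × String)) :
    (pvStepA cc item).keys = PySem.Set.add cc.keys (pvCid item) := by
  unfold pvStepA
  rw [PySem.Dict.keys_modify]
  by_cases h : cc.contains (pvCid item)
  · rw [if_pos h, PySem.Dict.keys_insert_of_contains _ _ h]
    simp [PySem.Set.add, PySem.Dict.contains_eq_decide_mem_keys] at h ⊢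
    simp [h]
  · simp only [Bool.not_eq_true] at h
    rw [if_neg (by simp [h]),
      PySem.Dict.keys_insert_of_contains _ _ (PySem.Dict.contains_insert_self cc _ _),
      PySem.Dict.keys_insert_of_not_contains cc _ h]
    simp [PySem.Set.add, PySem.Dict.contains_eq_decide_mem_keys] at h ⊢
    simp [h]

lemma pvStepB_keys (g : PySem.Dict String (List (List (String × String))))
    (item : List (String × String)) :
    (pvStepB g item).keys = PySem.Set.add g.keys (pvCid item) := by
  unfold pvStepB
  rw [PySem.Dict.keys_modify]
  by_cases h : g.contains (pvCid item)
  · rw [PySem.Dict.keys_insert_of_contains _ _ h]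
    simp [PySem.Set.add, PySem.Dict.contains_eq_decide_mem_keys] at h ⊢
    simp [h]
  · simp only [Bool.not_eq_true] at h
    rw [PySem.Dict.keys_insert_of_not_contains g _ h]
    simp [PySem.Set.add, PySem.Dict.contains_eq_decide_mem_keys] at h ⊢
    simp [h]

lemma pvA_keys (data : List (List (String × String)))
    (cc : PySem.Dict String (PySem.Dict String Int)) :
    (data.foldl pvStepA cc).keys = PySem.Set.update cc.keys (data.map pvCid) := by
  induction data generalizing cc with
  | nil => rfl
  | cons item rest ih =>
    simp only [List.foldl_cons, List.map_cons, PySem.Set.update, List.foldl_cons, ih,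
      pvStepA_keys]

lemma pvB_keys (data : List (List (String × String)))
    (g : PySem.Dict String (List (List (String × String)))) :
    (data.foldl pvStepB g).keys = PySem.Set.update g.keys (data.map pvCid) := by
  induction data generalizing g with
  | nil => rfl
  | cons item rest ih =>
    simp only [List.foldl_cons, List.map_cons, PySem.Set.update, List.foldl_cons, ih,
      pvStepB_keys]

-- ===== VERDICT (by name: the statement is the Claim_ definition above) =====
theorem count_by_client_and_status_spec : Claim_equal_count_by_client_and_status := by
  intro data _
  unfold Spec_count_by_client_and_status count_by_client_and_status count_by_client_and_status_alt
  have hsA : (fun (client_counts : PySem.Dict String (PySem.Dict String Int)) item =>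
      let client_id := (PySem.Dict.mk item).getD "client_id" "unknown"
      let status := parse_ticket_status item
      let client_counts :=
        if client_counts.contains client_id then client_counts
        else client_counts.insert client_id init_stats_dict
      client_counts.modify client_id init_stats_dict (fun d => d.modify status 0 (· + 1))) = pvStepA := rfl
  have hsB : (fun (groups : PySem.Dict String (List (List (String × String)))) item =>
      groups.modify ((PySem.Dict.mk item).getD "client_id" "unknown") [] (· ++ [item])) = pvStepB := rfl
  simp only [hsA, hsB]
  have hkA := pvA_keys data PySem.Dict.empty
  have hkB := pvB_keys data PySem.Dict.empty
  rw [PySem.Dict.keys_empty] at hkA hkB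
  have hnd : (PySem.Set.update ([] : List String) (data.map pvCid)).Nodup :=
    PySem.Set.nodup_update [] _ List.nodup_nil
  rw [PySem.Dict.items_eq_map_keys _ (hkA ▸ hnd) init_stats_dict,
      PySem.Dict.items_eq_map_keys _ (hkB ▸ hnd) ([] : List (List (String × String))),
      hkA, hkB, List.map_map, List.map_map]
  apply List.map_congr_left
  intro k _
  have hA := pvA_getD data PySem.Dict.empty k
  have hB := pvB_getD data PySem.Dict.empty k
  rw [PySem.Dict.getD_empty] at hA hB
  simp only [Function.comp, hA, hB, List.nil_append, pv_count_statuses]
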